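-- pv_equiv track=rewrite | github.com/razvan404/ubb-projects | 1st Semester/Computational Logic/Electronic Project/BaseCalculator/Domain/Fast_Converts.py | fromPowerTo2
-- ===== SOURCE A (Python) =====
-- def fromPowerTo2(groups, power):
--     '''
--     Transformă fiecare număr într-un grupuleț,
--     corespunzător tabelelor de conversie rapidă
--     din baza 2 la puterea *power* în baza 2
--     :param groups: list of lists
--     :param power: integer
--     :return: list of lists
--     '''
--     if power == 2:
--         for i in range(0, len(groups)):
--             if groups[i] == [0]:
--                 groups[i] = [0, 0]
--             elif groups[i] == [1]:
--                 groups[i] = [0, 1]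
--             elif groups[i] == [2]:
--                 groups[i] = [1, 0]
--             elif groups[i] == [3]:
--                 groups[i] = [1, 1]
--     elif power == 3:
--         for i in range(0, len(groups)):
--             if groups[i] == [0]:
--                 groups[i] = [0, 0, 0]
--             elif groups[i] == [1]:
--                 groups[i] = [0, 0, 1]
--             elif groups[i] == [2]:
--                 groups[i] = [0, 1, 0]
--             elif groups[i] == [3]:
--                 groups[i] = [0, 1, 1]
--             elif groups[i] == [4]:
--                 groups[i] = [1, 0, 0]
--             elif groups[i] == [5]:
--                 groups[i] = [1, 0, 1]
--             elif groups[i] == [6]: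
--                 groups[i] = [1, 1, 0]
--             elif groups[i] == [7]:
--                 groups[i] = [1, 1, 1]
--     elif power == 4:
--         for i in range(0, len(groups)):
--             if groups[i] == [0]:
--                 groups[i] = [0, 0, 0, 0]
--             elif groups[i] == [1]:
--                 groups[i] = [0, 0, 0, 1]
--             elif groups[i] == [2]:
--                 groups[i] = [0, 0, 1, 0]
--             elif groups[i] == [3]:
--                 groups[i] = [0, 0, 1, 1]
--             elif groups[i] == [4]:
--                 groups[i] = [0, 1, 0, 0]
--             elif groups[i] == [5]:
--                 groups[i] = [0, 1, 0, 1]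
--             elif groups[i] == [6]:
--                 groups[i] = [0, 1, 1, 0]
--             elif groups[i] == [7]:
--                 groups[i] = [0, 1, 1, 1]
--             elif groups[i] == [8]:
--                 groups[i] = [1, 0, 0, 0]
--             elif groups[i] == [9]:
--                 groups[i] = [1, 0, 0, 1]
--             elif groups[i] == [10]:
--                 groups[i] = [1, 0, 1, 0]
--             elif groups[i] == [11]:
--                 groups[i] = [1, 0, 1, 1]
--             elif groups[i] == [12]:
--                 groups[i] = [1, 1, 0, 0]
--             elif groups[i] == [13]:
--                 groups[i] = [1, 1, 0, 1]
--             elif groups[i] == [14]: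
--                 groups[i] = [1, 1, 1, 0]
--             elif groups[i] == [15]:
--                 groups[i] = [1, 1, 1, 1]
--     return groups
-- ===== SOURCE B (Python) =====
-- def fromPowerTo2(groups, power):
--     # Single loop with a closed-form bit expansion instead of three hand-written lookup chains.
--     # Mutates groups in place and returns it, like the original.
--     if power in (2, 3, 4):
--         for i in range(len(groups)):
--             g = groups[i]
--             if len(g) == 1 and 0 <= g[0] < 2 ** power:
--                 v = g[0]
--                 groups[i] = [(v >> (power - 1 - j)) & 1 for j in range(power)]
--     return groups
-- ===== Notes on version B (the rewrite author's own statement) =====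
-- stated objective: simpler
-- what changed: Replaces the three hand-written 4/8/16-branch lookup chains with one loop that computes each bit list by a closed-form shift-and-mask formula.
import Mathlib
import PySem

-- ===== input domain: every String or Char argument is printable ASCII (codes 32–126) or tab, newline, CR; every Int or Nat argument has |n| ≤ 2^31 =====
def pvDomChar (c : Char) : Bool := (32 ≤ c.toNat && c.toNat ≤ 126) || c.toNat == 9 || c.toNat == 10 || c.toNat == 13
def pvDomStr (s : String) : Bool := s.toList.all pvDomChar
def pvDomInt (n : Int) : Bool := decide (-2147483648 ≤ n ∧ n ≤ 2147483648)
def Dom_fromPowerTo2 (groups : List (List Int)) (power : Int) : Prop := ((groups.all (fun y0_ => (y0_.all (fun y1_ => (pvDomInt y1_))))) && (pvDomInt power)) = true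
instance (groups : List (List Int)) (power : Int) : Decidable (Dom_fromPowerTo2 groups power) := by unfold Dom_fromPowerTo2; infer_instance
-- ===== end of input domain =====

-- B replaces A's three lookup-table if-chains by one closed-form shift-and-mask loop (objective: simpler).
-- A mutates `groups` in place and returns it; the equivalence proved here is about the return value.

-- ===== PORT A =====
-- one element of A's power=2 if-chain
def pvConv2 (g : List Int) : List Int :=
  if g = [0] then [0, 0]
  else if g = [1] then [0, 1]
  else if g = [2] then [1, 0]
  else if g = [3] then [1, 1]
  else g

-- one element of A's power=3 if-chain
def pvConv3 (g : List Int) : List Int :=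
  if g = [0] then [0, 0, 0]
  else if g = [1] then [0, 0, 1]
  else if g = [2] then [0, 1, 0]
  else if g = [3] then [0, 1, 1]
  else if g = [4] then [1, 0, 0]
  else if g = [5] then [1, 0, 1]
  else if g = [6] then [1, 1, 0]
  else if g = [7] then [1, 1, 1]
  else g

-- one element of A's power=4 if-chain
def pvConv4 (g : List Int) : List Int :=
  if g = [0] then [0, 0, 0, 0]
  else if g = [1] then [0, 0, 0, 1]
  else if g = [2] then [0, 0, 1, 0]
  else if g = [3] then [0, 0, 1, 1]
  else if g = [4] then [0, 1, 0, 0]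
  else if g = [5] then [0, 1, 0, 1]
  else if g = [6] then [0, 1, 1, 0]
  else if g = [7] then [0, 1, 1, 1]
  else if g = [8] then [1, 0, 0, 0]
  else if g = [9] then [1, 0, 0, 1]
  else if g = [10] then [1, 0, 1, 0]
  else if g = [11] then [1, 0, 1, 1]
  else if g = [12] then [1, 1, 0, 0]
  else if g = [13] then [1, 1, 0, 1]
  else if g = [14] then [1, 1, 1, 0]
  else if g = [15] then [1, 1, 1, 1]
  else g

-- A's in-place index loop over all of groups becomes a map applying the chain to each element.
def fromPowerTo2 (groups : List (List Int)) (power : Int) : List (List Int) :=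
  if power = 2 then groups.map pvConv2
  else if power = 3 then groups.map pvConv3
  else if power = 4 then groups.map pvConv4
  else groups

-- ===== PORT B =====
-- (v >> (power-1-j)) & 1 for j in range(power); for the in-use shift amounts (0 ≤ power-1-j)
-- and v ≥ 0, Python's >> is floor-division by 2^k and & 1 is mod 2 — exact here.
def pvBits (v : Int) (power : Int) : List Int :=
  (PySem.List.pyRange 0 power 1).map
    (fun j => PySem.Int.mod (PySem.Int.floordiv v (2 ^ (power - 1 - j).toNat)) 2)

def pvAltElem (power : Int) (g : List Int) : List Int :=
  match g with
  | [v] => if 0 ≤ v ∧ v < 2 ^ power.toNat then pvBits v power else g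
  | _ => g

def fromPowerTo2_alt (groups : List (List Int)) (power : Int) : List (List Int) :=
  if power = 2 ∨ power = 3 ∨ power = 4 then groups.map (pvAltElem power) else groups

-- ===== PRECONDITION & SPEC =====
def Spec_fromPowerTo2 (groups : List (List Int)) (power : Int) (out : List (List Int)) : Prop := out = fromPowerTo2_alt groups power
instance (groups : List (List Int)) (power : Int) (out : List (List Int)) : Decidable (Spec_fromPowerTo2 groups power out) := by unfold Spec_fromPowerTo2; infer_instance

-- ===== CLAIM (what is proved, stated in full; the proofs are below) =====
def Claim_equal_fromPowerTo2 : Prop := ∀ (groups : List (List Int)) (power : Int), Dom_fromPowerTo2 groups power → Spec_fromPowerTo2 groups power (fromPowerTo2 groups power)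

-- ===== LEMMAS AND PROOFS =====
lemma pvConv2_eq (g : List Int) : pvConv2 g = pvAltElem 2 g := by
  match g with
  | [] => rfl
  | _ :: _ :: _ => simp [pvConv2, pvAltElem]
  | [a] =>
    by_cases h : 0 ≤ a ∧ a < 4
    · obtain ⟨h1, h2⟩ := h; interval_cases a <;> decide
    · have hg : ¬ (0 ≤ a ∧ a < (2:Int) ^ (2:Int).toNat) := by
        rw [show ((2:Int) ^ (2:Int).toNat) = 4 by decide]; exact h
      have ne : ∀ k : Int, 0 ≤ k → k < 4 → ([a] : List Int) ≠ [k] := by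
        intro k hk1 hk2 hc
        have : a = k := by injection hc
        omega
      simp only [pvConv2, pvAltElem]
      rw [if_neg (ne 0 (by norm_num) (by norm_num)),
          if_neg (ne 1 (by norm_num) (by norm_num)),
          if_neg (ne 2 (by norm_num) (by norm_num)),
          if_neg (ne 3 (by norm_num) (by norm_num)),
          if_neg hg]

lemma pvConv3_eq (g : List Int) : pvConv3 g = pvAltElem 3 g := by
  match g with
  | [] => rfl
  | _ :: _ :: _ => simp [pvConv3, pvAltElem]
  | [a] =>
    by_cases h : 0 ≤ a ∧ a < 8
    · obtain ⟨h1, h2⟩ := h; interval_cases a <;> decide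
    · have hg : ¬ (0 ≤ a ∧ a < (2:Int) ^ (3:Int).toNat) := by
        rw [show ((2:Int) ^ (3:Int).toNat) = 8 by decide]; exact h
      have ne : ∀ k : Int, 0 ≤ k → k < 8 → ([a] : List Int) ≠ [k] := by
        intro k hk1 hk2 hc
        have : a = k := by injection hc
        omega
      simp only [pvConv3, pvAltElem]
      rw [if_neg (ne 0 (by norm_num) (by norm_num)),
          if_neg (ne 1 (by norm_num) (by norm_num)),
          if_neg (ne 2 (by norm_num) (by norm_num)),
          if_neg (ne 3 (by norm_num) (by norm_num)),
          if_neg (ne 4 (by norm_num) (by norm_num)),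
          if_neg (ne 5 (by norm_num) (by norm_num)),
          if_neg (ne 6 (by norm_num) (by norm_num)),
          if_neg (ne 7 (by norm_num) (by norm_num)),
          if_neg hg]

lemma pvConv4_eq (g : List Int) : pvConv4 g = pvAltElem 4 g := by
  match g with
  | [] => rfl
  | _ :: _ :: _ => simp [pvConv4, pvAltElem]
  | [a] =>
    by_cases h : 0 ≤ a ∧ a < 16
    · obtain ⟨h1, h2⟩ := h; interval_cases a <;> decide
    · have hg : ¬ (0 ≤ a ∧ a < (2:Int) ^ (4:Int).toNat) := by
        rw [show ((2:Int) ^ (4:Int).toNat) = 16 by decide]; exact h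
      have ne : ∀ k : Int, 0 ≤ k → k < 16 → ([a] : List Int) ≠ [k] := by
        intro k hk1 hk2 hc
        have : a = k := by injection hc
        omega
      simp only [pvConv4, pvAltElem]
      rw [if_neg (ne 0 (by norm_num) (by norm_num)),
          if_neg (ne 1 (by norm_num) (by norm_num)),
          if_neg (ne 2 (by norm_num) (by norm_num)),
          if_neg (ne 3 (by norm_num) (by norm_num)),
          if_neg (ne 4 (by norm_num) (by norm_num)),
          if_neg (ne 5 (by norm_num) (by norm_num)),
          if_neg (ne 6 (by norm_num) (by norm_num)),
          if_neg (ne 7 (by norm_num) (by norm_num)),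
          if_neg (ne 8 (by norm_num) (by norm_num)),
          if_neg (ne 9 (by norm_num) (by norm_num)),
          if_neg (ne 10 (by norm_num) (by norm_num)),
          if_neg (ne 11 (by norm_num) (by norm_num)),
          if_neg (ne 12 (by norm_num) (by norm_num)),
          if_neg (ne 13 (by norm_num) (by norm_num)),
          if_neg (ne 14 (by norm_num) (by norm_num)),
          if_neg (ne 15 (by norm_num) (by norm_num)),
          if_neg hg]

-- ===== VERDICT (by name: the statement is the Claim_ definition above) =====
theorem fromPowerTo2_spec : Claim_equal_fromPowerTo2 := by
  intro groups power _
  unfold Spec_fromPowerTo2 fromPowerTo2 fromPowerTo2_alt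
  by_cases h2 : power = 2
  · subst h2
    rw [if_pos rfl, if_pos (by norm_num)]
    exact List.map_congr_left (fun g _ => pvConv2_eq g)
  · by_cases h3 : power = 3
    · subst h3
      rw [if_neg (by norm_num), if_pos rfl, if_pos (by norm_num)]
      exact List.map_congr_left (fun g _ => pvConv3_eq g)
    · by_cases h4 : power = 4
      · subst h4
        rw [if_neg (by norm_num), if_neg (by norm_num), if_pos rfl, if_pos (by norm_num)]
        exact List.map_congr_left (fun g _ => pvConv4_eq g)
      · rw [if_neg h2, if_neg h3, if_neg h4, if_neg (by tauto)]
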